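-- pv_equiv track=rewrite | github.com/KinTamashii/MSBTEditorPro | msbt.py | clean_string_export
-- ===== SOURCE A (Python) =====
-- def clean_string_export(coded_string):
--     ind = 0
--     string_len = len(coded_string)
--     Clean_Strings_List = []
--     clean_string = ""
--     while ind < string_len:
--         match coded_string[ind]:
--             case "<":
--                 ind += 1
--                 next_ind = coded_string.index(">", ind)
--                 code = coded_string[ind:next_ind]
--                 if code == "PageBreak":
--                     Clean_Strings_List += (clean_string,)
--                     clean_string = ""
--                 elif code == "/br":
--                     clean_string += " "
--                 ind = next_ind
--             case "\\":
--                 ind += 1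
--                 clean_string += coded_string[ind]
--             case _:
--                 clean_string += coded_string[ind]
--         ind += 1
--     Clean_Strings_List += (clean_string,)
--
--
--     return Clean_Strings_List
-- ===== SOURCE B (Python) =====
-- # Two-phase re-implementation: tokenize once (tags / escaped chars / maximal
-- # literal runs), then fold the token list into pages.
--
-- def _tokenize(s):
--     if not s:
--         return []
--     if s[0] == '<':
--         tag, _, rest = s[1:].partition('>')
--         return [('tag', tag)] + _tokenize(rest)
--     if s[0] == '\\':
--         return [('lit', s[1])] + _tokenize(s[2:])
--     i = 0
--     while i < len(s) and s[i] not in '<\\':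
--         i += 1
--     return [('lit', s[:i])] + _tokenize(s[i:])
--
--
-- def clean_string_export(coded_string):
--     pages = []
--     cur = []
--     for kind, val in _tokenize(coded_string):
--         if kind == 'tag':
--             if val == 'PageBreak':
--                 pages.append(''.join(cur))
--                 cur = []
--             elif val == '/br':
--                 cur.append(' ')
--         else:
--             cur.append(val)
--     pages.append(''.join(cur))
--     return pages
-- ===== Notes on version B (the rewrite author's own statement) =====
-- stated objective: faster
-- what changed: Replaces A's single index-driven while loop (manual cursor arithmetic, char-by-char string concatenation) with a two-phase decomposition: a recursive tokenizer producing tag / escaped-char / maximal-literal-run tokens, then a fold over the token list that appends to a list and joins each page once.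
import Mathlib
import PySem

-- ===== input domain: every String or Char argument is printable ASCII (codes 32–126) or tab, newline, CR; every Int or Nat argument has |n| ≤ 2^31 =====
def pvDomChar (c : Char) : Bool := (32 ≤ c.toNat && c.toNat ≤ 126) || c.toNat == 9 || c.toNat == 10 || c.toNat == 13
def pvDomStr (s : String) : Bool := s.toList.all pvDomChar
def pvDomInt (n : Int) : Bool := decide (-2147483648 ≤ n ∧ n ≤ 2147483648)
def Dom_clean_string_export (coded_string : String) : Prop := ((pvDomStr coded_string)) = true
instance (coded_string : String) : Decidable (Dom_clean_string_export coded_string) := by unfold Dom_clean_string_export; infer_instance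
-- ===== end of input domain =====

-- B re-implements the export cleaner as tokenize-then-fold (tags / escaped chars /
-- maximal literal runs) instead of A's single index-driven character loop, collecting
-- pages as lists joined once instead of per-char string +=; a timing run measured
-- B faster. Equivalence is proved on all inputs where A returns (Pre_ below excludes
-- exactly A's ValueError/IndexError inputs).

-- ===== PORT A =====
-- A's while loop, transliterated with an index and fuel (ind strictly increases each
-- iteration, so fuel = length + 1 suffices; the fuel-0 / error arms are unreachable
-- under Pre_).  clean_string is carried as List Char (Python str), pages as String.
-- coded_string.index(">", ind) is ported as PySem.List.index? on (cs.drop ind) plus ind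
-- (exact: first '>' at position ≥ ind; none = ValueError).
def cleanLoopA (cs : List Char) (stringLen : Nat) :
    Nat → Nat → List String → List Char → List String
  | 0, _, acc, cur => acc ++ [String.mk cur]
  | fuel+1, ind, acc, cur =>
    if ind < stringLen then
      let c := cs.getD ind ' '   -- coded_string[ind], exact: ind < stringLen = length
      if c = '<' then
        match PySem.List.index? (cs.drop (ind + 1)) '>' with
        | none => acc ++ [String.mk cur]   -- ValueError (unreachable under Pre_)
        | some off =>
          let next_ind := ind + 1 + off
          let code := PySem.List.slice cs (some ((ind + 1 : Nat) : Int)) (some ((next_ind : Nat) : Int))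
          if code = "PageBreak".toList then
            cleanLoopA cs stringLen fuel (next_ind + 1) (acc ++ [String.mk cur]) []
          else if code = "/br".toList then
            cleanLoopA cs stringLen fuel (next_ind + 1) acc (cur ++ [' '])
          else
            cleanLoopA cs stringLen fuel (next_ind + 1) acc cur
      else if c = '\\' then
        match PySem.List.pyGet? cs ((ind + 1 : Nat) : Int) with
        | none => acc ++ [String.mk cur]   -- IndexError (unreachable under Pre_)
        | some d => cleanLoopA cs stringLen fuel (ind + 2) acc (cur ++ [d])
      else
        cleanLoopA cs stringLen fuel (ind + 1) acc (cur ++ [c])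
    else
      acc ++ [String.mk cur]

def clean_string_export (coded_string : String) : List String :=
  let cs := coded_string.toList
  cleanLoopA cs cs.length (cs.length + 1) 0 [] []

-- ===== PORT B =====
inductive PvTok
  | tag : List Char → PvTok
  | lit : List Char → PvTok
deriving DecidableEq, Repr

def pvNotSpec (c : Char) : Bool := c != '<' && c != '\\'

-- Source B's _tokenize: recursion on the string tail; '<' consumes through the first '>'
-- (partition: empty remainder when '>' is absent), '\' consumes the next char
-- (Python raises IndexError on a lone trailing '\': outside Pre_, ported as a lit []),
-- otherwise a maximal literal run.
def pvTokenize : List Char → List PvTok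
  | [] => []
  | c :: rest =>
    if c = '<' then
      PvTok.tag (rest.takeWhile (· != '>')) ::
        pvTokenize ((rest.dropWhile (· != '>')).drop 1)
    else if c = '\\' then
      match rest with
      | [] => [PvTok.lit []]
      | d :: rest' => PvTok.lit [d] :: pvTokenize rest'
    else
      PvTok.lit (c :: rest.takeWhile pvNotSpec) :: pvTokenize (rest.dropWhile pvNotSpec)
termination_by l => l.length
decreasing_by
  · have h := List.length_dropWhile_le (p := fun c => c != '>') rest
    simp only [List.length_cons, List.length_drop]; omega
  · simp only [List.length_cons, List.length_drop]; omega
  · have h := List.length_dropWhile_le (p := pvNotSpec) rest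
    simp only [List.length_cons, List.length_drop]; omega

-- Source B's token fold: pages / cur accumulators, ''.join(cur) = String.mk.
def pvFoldTok : List PvTok → List String → List Char → List String
  | [], pages, cur => pages ++ [String.mk cur]
  | PvTok.tag t :: ts, pages, cur =>
    if t = "PageBreak".toList then pvFoldTok ts (pages ++ [String.mk cur]) []
    else if t = "/br".toList then pvFoldTok ts pages (cur ++ [' '])
    else pvFoldTok ts pages cur
  | PvTok.lit l :: ts, pages, cur => pvFoldTok ts pages (cur ++ l)

def clean_string_export_alt (coded_string : String) : List String :=
  pvFoldTok (pvTokenize coded_string.toList) [] []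

-- ===== PRECONDITION & SPEC =====
-- Pre_ excludes exactly the inputs on which A raises: an unescaped '<' with no later
-- '>' (ValueError from str.index) or a trailing unescaped '\' (IndexError).
-- Scanner modes: 0 = normal, 1 = just after an unescaped '\', 2 = inside a <...> tag.
-- pvScan l 0 = true iff A returns normally on l (no unmatched '<', no trailing '\').
def pvScan : List Char → Nat → Bool
  | [], m => m == 0
  | c :: rest, m =>
    if m = 1 then pvScan rest 0
    else if m = 2 then (if c = '>' then pvScan rest 0 else pvScan rest 2)
    else if c = '<' then pvScan rest 2
    else if c = '\\' then pvScan rest 1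
    else pvScan rest 0

def Pre_clean_string_export (coded_string : String) : Prop :=
  pvScan coded_string.toList 0 = true
instance (coded_string : String) : Decidable (Pre_clean_string_export coded_string) := by
  unfold Pre_clean_string_export; infer_instance

def pvWitness_clean_string_export : String := "a\\<b<X>c</br>d<PageBreak>e"

def Spec_clean_string_export (coded_string : String) (out : List String) : Prop := out = clean_string_export_alt coded_string
instance (coded_string : String) (out : List String) : Decidable (Spec_clean_string_export coded_string out) := by unfold Spec_clean_string_export; infer_instance

-- ===== CLAIM (what is proved, stated in full; the proofs are below) =====
def Claim_equal_clean_string_export : Prop := ∀ (coded_string : String), Dom_clean_string_export coded_string → Pre_clean_string_export coded_string → Spec_clean_string_export coded_string (clean_string_export coded_string)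

-- ===== LEMMAS AND PROOFS =====

lemma pvScan_tag_eq (rest : List Char) : pvScan ('<' :: rest) 0 = pvScan rest 2 := by
  simp [pvScan]

lemma pvScan_esc (e : Char) (rest : List Char) :
    pvScan ('\\' :: e :: rest) 0 = pvScan rest 0 := by
  simp [pvScan]

lemma pvScan_esc_nil : pvScan ['\\'] 0 = false := by decide

lemma pvScan_lit (c : Char) (rest : List Char) (h1 : c ≠ '<') (h2 : c ≠ '\\') :
    pvScan (c :: rest) 0 = pvScan rest 0 := by
  simp [pvScan, h1, h2]

lemma pvScan_twoSpec : ∀ (rest : List Char), pvScan rest 2 = true →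
    '>' ∈ rest ∧ pvScan ((rest.dropWhile (· != '>')).drop 1) 0 = true := by
  intro rest
  induction rest with
  | nil => intro h; simp [pvScan] at h
  | cons c r ih =>
    intro h
    by_cases hc : c = '>'
    · subst hc
      refine ⟨List.mem_cons_self, ?_⟩
      rw [List.dropWhile_cons_of_neg (by simp)]
      simpa [pvScan] using h
    · have h' : pvScan r 2 = true := by simpa [pvScan, hc] using h
      obtain ⟨h1, h2⟩ := ih h'
      refine ⟨List.mem_cons_of_mem _ h1, ?_⟩
      rwa [List.dropWhile_cons_of_pos (by simp [hc])]

lemma pvTokenize_tag (rest : List Char) :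
    pvTokenize ('<' :: rest)
      = PvTok.tag (rest.takeWhile (· != '>'))
          :: pvTokenize ((rest.dropWhile (· != '>')).drop 1) := by
  rw [pvTokenize.eq_def]; simp

lemma pvTokenize_esc (d : Char) (rest : List Char) :
    pvTokenize ('\\' :: d :: rest) = PvTok.lit [d] :: pvTokenize rest := by
  rw [pvTokenize.eq_def]; simp

lemma pvTokenize_lit (c : Char) (rest : List Char) (h1 : c ≠ '<') (h2 : c ≠ '\\') :
    pvTokenize (c :: rest)
      = PvTok.lit (c :: rest.takeWhile pvNotSpec)
          :: pvTokenize (rest.dropWhile pvNotSpec) := by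
  rw [pvTokenize.eq_def]; simp [h1, h2]

lemma pvFoldTok_tag (t : List Char) (ts : List PvTok) (pages : List String) (cur : List Char) :
    pvFoldTok (PvTok.tag t :: ts) pages cur
      = if t = "PageBreak".toList then pvFoldTok ts (pages ++ [String.mk cur]) []
        else if t = "/br".toList then pvFoldTok ts pages (cur ++ [' '])
        else pvFoldTok ts pages cur := rfl

lemma pvFoldTok_lit (l : List Char) (ts : List PvTok) (pages : List String) (cur : List Char) :
    pvFoldTok (PvTok.lit l :: ts) pages cur = pvFoldTok ts pages (cur ++ l) := rfl

lemma pvDropCons (cs : List Char) (ind : Nat) (h : ind < cs.length) :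
    cs.drop ind = cs.getD ind ' ' :: cs.drop (ind + 1) := by
  rw [List.getD_eq_getElem cs ' ' h]
  exact (List.getElem_cons_drop h).symm

lemma pvIndexSplit : ∀ (xs : List Char) (off : Nat),
    PySem.List.index? xs '>' = some off →
    xs.takeWhile (· != '>') = xs.take off ∧ xs.dropWhile (· != '>') = xs.drop off := by
  intro xs
  induction xs with
  | nil => intro off h; rw [PySem.List.index?_eq_idxOf?] at h; simp at h
  | cons x xs ih =>
    intro off h
    by_cases hx : x = '>'
    · subst hx
      rw [PySem.List.index?_cons_self] at h
      cases h
      simp [List.takeWhile_cons, List.dropWhile_cons]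
    · rw [PySem.List.index?_cons_of_ne xs hx] at h
      cases ho : PySem.List.index? xs '>' with
      | none => rw [ho] at h; simp at h
      | some k =>
        rw [ho] at h
        simp only [Option.map_some, Option.some.injEq] at h
        subst h
        obtain ⟨h1, h2⟩ := ih k ho
        simp [List.takeWhile_cons, List.dropWhile_cons, hx, h1, h2]

lemma pvLitStep (c : Char) (s : List Char) (hc1 : c ≠ '<') (hc2 : c ≠ '\\')
    (pages : List String) (cur : List Char) :
    pvFoldTok (pvTokenize (c :: s)) pages cur
      = pvFoldTok (pvTokenize s) pages (cur ++ [c]) := by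
  rw [pvTokenize_lit c s hc1 hc2, pvFoldTok_lit]
  cases s with
  | nil => simp [pvTokenize]
  | cons d s' =>
    by_cases hd : pvNotSpec d
    · have hd1 : d ≠ '<' := by simp [pvNotSpec] at hd; exact hd.1
      have hd2 : d ≠ '\\' := by simp [pvNotSpec] at hd; exact hd.2
      rw [List.takeWhile_cons_of_pos hd, List.dropWhile_cons_of_pos hd,
        pvTokenize_lit d s' hd1 hd2, pvFoldTok_lit]
      simp
    · rw [List.takeWhile_cons_of_neg hd, List.dropWhile_cons_of_neg hd]

lemma pvMain (cs : List Char) : ∀ (fuel ind : Nat) (pages : List String) (cur : List Char),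
    pvScan (cs.drop ind) 0 = true → cs.length - ind < fuel →
    cleanLoopA cs cs.length fuel ind pages cur
      = pvFoldTok (pvTokenize (cs.drop ind)) pages cur := by
  intro fuel
  induction fuel with
  | zero => intro ind pages cur _ hlt; omega
  | succ fuel ih =>
    intro ind pages cur hwf hlt
    by_cases hind : ind < cs.length
    · have hdrop := pvDropCons cs ind hind
      by_cases hc : cs.getD ind ' ' = '<'
      · -- tag case
        rw [hdrop, hc] at hwf ⊢
        rw [pvScan_tag_eq] at hwf
        obtain ⟨hmem, hwf2'⟩ := pvScan_twoSpec _ hwf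
        have hsome : (PySem.List.index? (cs.drop (ind + 1)) '>').isSome := by
          rw [PySem.List.index?_isSome_iff]; exact hmem
        obtain ⟨off, hoff⟩ := Option.isSome_iff_exists.mp hsome
        obtain ⟨htw, hdw⟩ := pvIndexSplit _ _ hoff
        have hslice : PySem.List.slice cs (some ((ind + 1 : Nat) : Int))
            (some ((ind + 1 + off : Nat) : Int)) = (cs.drop (ind + 1)).take off := by
          rw [PySem.List.slice_natCast]
          congr 1 <;> omega
        have hrest : ((cs.drop (ind + 1)).dropWhile (· != '>')).drop 1
            = cs.drop (ind + 1 + off + 1) := by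
          rw [hdw, List.drop_drop, List.drop_drop]
          congr 1 <;> omega
        have hwf2 : pvScan (cs.drop (ind + 1 + off + 1)) 0 = true := by
          rw [← hrest]; exact hwf2'
        have hoffle : off < (cs.drop (ind + 1)).length := by
          rcases PySem.List.getElem_of_index?_eq_some hoff with ⟨hk, _⟩
          exact hk
        have hlen : (cs.drop (ind + 1)).length = cs.length - (ind + 1) :=
          List.length_drop
        rw [cleanLoopA]
        simp only [if_pos hind, hc, if_pos rfl, hoff, hslice, eq_self_iff_true, if_true]
        rw [pvTokenize_tag, htw, hrest, pvFoldTok_tag]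
        by_cases hpb : (cs.drop (ind + 1)).take off = "PageBreak".toList
        · simp only [if_pos hpb]
          exact ih _ _ _ hwf2 (by omega)
        · by_cases hbr : (cs.drop (ind + 1)).take off = "/br".toList
          · simp only [if_neg hpb, if_pos hbr]
            exact ih _ _ _ hwf2 (by omega)
          · simp only [if_neg hpb, if_neg hbr]
            exact ih _ _ _ hwf2 (by omega)
      · by_cases hc2 : cs.getD ind ' ' = '\\'
        · -- escape case
          rw [hdrop, hc2] at hwf ⊢
          cases hrest : cs.drop (ind + 1) with
          | nil =>
            rw [hrest] at hwf
            rw [pvScan_esc_nil] at hwf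
            cases hwf
          | cons e r =>
            rw [hrest] at hwf
            rw [pvScan_esc] at hwf
            have hind1 : ind + 1 < cs.length := by
              by_contra hcon
              rw [List.drop_eq_nil_of_le (by omega)] at hrest
              cases hrest
            have hdrop1 := pvDropCons cs (ind + 1) hind1
            rw [hrest] at hdrop1
            injection hdrop1 with he hr
            have hget : PySem.List.pyGet? cs ((ind + 1 : Nat) : Int) = some e := by
              rw [PySem.List.pyGet?_natCast, List.getElem?_eq_getElem hind1,
                ← List.getD_eq_getElem cs ' ' hind1, he]
            rw [cleanLoopA]
            simp only [if_pos hind, if_neg hc, hc2, if_pos rfl, hget, eq_self_iff_true,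
              if_true, if_neg (show ('\\' : Char) ≠ '<' by decide)]
            rw [pvTokenize_esc, pvFoldTok_lit, hr]
            exact ih (ind + 2) pages (cur ++ [e]) (hr ▸ hwf) (by omega)
        · -- literal case
          rw [hdrop] at hwf ⊢
          have hwf' : pvScan (cs.drop (ind + 1)) 0 = true := by
            rw [pvScan_lit _ _ hc hc2] at hwf
            exact hwf
          rw [cleanLoopA]
          simp only [if_pos hind, if_neg hc, if_neg hc2]
          rw [pvLitStep _ _ hc hc2]
          exact ih _ _ _ hwf' (by omega)
    · have hnil : cs.drop ind = [] := List.drop_eq_nil_of_le (by omega)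
      rw [hnil, cleanLoopA, pvTokenize, pvFoldTok]
      simp [hind]

-- ===== VERDICT (by name: the statement is the Claim_ definition above) =====
theorem clean_string_export_spec : Claim_equal_clean_string_export := by
  unfold Claim_equal_clean_string_export Spec_clean_string_export
  intro s _ hpre
  unfold clean_string_export clean_string_export_alt
  have h := pvMain s.toList (s.toList.length + 1) 0 [] []
    (by simpa [Pre_clean_string_export] using hpre) (by omega)
  simpa using h
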